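-- pv_equiv track=rewrite | github.com/morganizwd/poetry | llm_poetry_tools.py | resolve_report_fieldnames
-- ===== SOURCE A (Python) =====
-- from typing import Any, Dict, List, Optional, Sequence
--
-- def resolve_report_fieldnames(
--     rows: Sequence[Dict[str, Any]],
--     preferred_fields: Optional[Sequence[str]] = None,
-- ) -> List[str]:
--     """Build a stable ordered field list for report export."""
--
--     preferred_fields = list(preferred_fields or [])
--     keys = []
--     for row in rows:
--         for key in row.keys():
--             if key not in keys:
--                 keys.append(key)
--
--     extra_fields = [key for key in keys if key not in preferred_fields]
--     return preferred_fields + extra_fields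
-- ===== SOURCE B (Python) =====
-- from typing import Any, Dict, List, Optional, Sequence
--
-- def resolve_report_fieldnames(
--     rows: Sequence[Dict[str, Any]],
--     preferred_fields: Optional[Sequence[str]] = None,
-- ) -> List[str]:
--     """Stable ordered field list: index keys by first occurrence, then sort by it."""
--     preferred = list(preferred_fields or [])
--     flat = [key for row in rows for key in row.keys()]
--     first = {}
--     # reverse overwrite pass: the last write for each key is its earliest index
--     for i, key in reversed(list(enumerate(flat))):
--         first[key] = i
--     banned = set(preferred)
--     extras = sorted((key for key in first if key not in banned),
--                     key=lambda key: first[key])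
--     return preferred + extras
-- ===== Notes on version B (the rewrite author's own statement) =====
-- stated objective: faster
-- what changed: A grows a dedup list with a linear membership scan per key and then runs a second partitioning pass against preferred_fields; B flattens the keys, computes each key's first-occurrence index with a single reverse overwrite pass over a dict (no membership tests), and sorts the non-preferred keys by that index.
import Mathlib
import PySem

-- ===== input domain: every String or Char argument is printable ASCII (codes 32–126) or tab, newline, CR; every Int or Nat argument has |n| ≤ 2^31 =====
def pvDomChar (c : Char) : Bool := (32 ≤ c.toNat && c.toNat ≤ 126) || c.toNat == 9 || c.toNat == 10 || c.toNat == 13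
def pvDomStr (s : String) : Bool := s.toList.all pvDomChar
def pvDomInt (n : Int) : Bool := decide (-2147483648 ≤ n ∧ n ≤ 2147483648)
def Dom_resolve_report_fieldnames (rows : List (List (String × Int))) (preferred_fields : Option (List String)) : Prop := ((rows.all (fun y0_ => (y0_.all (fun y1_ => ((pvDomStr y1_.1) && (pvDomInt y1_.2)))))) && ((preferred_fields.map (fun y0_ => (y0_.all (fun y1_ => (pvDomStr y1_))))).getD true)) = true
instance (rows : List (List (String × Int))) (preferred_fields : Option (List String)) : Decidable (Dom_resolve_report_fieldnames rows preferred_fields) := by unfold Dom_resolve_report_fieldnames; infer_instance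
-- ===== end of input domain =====

-- B replaces A's dedup-append + partition passes by: flatten the keys, index each key's
-- first occurrence with a reverse overwrite pass over a dict, and sort the non-preferred
-- keys by that index (a genuinely different algorithm; proved equal on all inputs).


-- ===== PORT A =====
def resolve_report_fieldnames (rows : List (List (String × Int))) (preferred_fields : Option (List String)) : List String :=
  -- preferred_fields = list(preferred_fields or [])
  let preferred := preferred_fields.getD []
  -- keys = []; for row in rows: for key in row.keys(): if key not in keys: keys.append(key)
  -- (row.keys() over the association list = its keys in insertion order, i.e. row.map Prod.fst)
  let keys := rows.foldl (fun keys row =>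
    (row.map Prod.fst).foldl (fun keys key =>
      if keys.contains key then keys else keys ++ [key]) keys) []
  -- extra_fields = [key for key in keys if key not in preferred_fields]
  let extra_fields := keys.filter (fun key => !(preferred.contains key))
  preferred ++ extra_fields

-- ===== PORT B =====
def resolve_report_fieldnames_alt (rows : List (List (String × Int))) (preferred_fields : Option (List String)) : List String :=
  -- preferred = list(preferred_fields or [])
  let preferred := preferred_fields.getD []
  -- flat = [key for row in rows for key in row.keys()]
  let flat := rows.flatMap (fun row => row.map Prod.fst)
  -- for i, key in reversed(list(enumerate(flat))): first[key] = i
  let first := ((PySem.List.enumerate flat).reverse).foldl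
    (fun (d : PySem.Dict String Int) p => d.insert p.2 p.1) PySem.Dict.empty
  -- banned = set(preferred)
  let banned := PySem.Set.ofList preferred
  -- extras = sorted((key for key in first if key not in banned), key=lambda key: first[key])
  -- (first[key]: every key iterated is a key of `first`, so the getD default is never read)
  let extras := PySem.List.sorted
    ((PySem.Dict.keys first).filter (fun key => !(PySem.Set.contains banned key)))
    (fun key => PySem.Dict.getD first key 0) false
  preferred ++ extras

-- ===== PRECONDITION & SPEC =====
def Spec_resolve_report_fieldnames (rows : List (List (String × Int))) (preferred_fields : Option (List String)) (out : List String) : Prop := out = resolve_report_fieldnames_alt rows preferred_fields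
instance (rows : List (List (String × Int))) (preferred_fields : Option (List String)) (out : List String) : Decidable (Spec_resolve_report_fieldnames rows preferred_fields out) := by unfold Spec_resolve_report_fieldnames; infer_instance

-- ===== CLAIM (what is proved, stated in full; the proofs are below) =====
def Claim_equal_resolve_report_fieldnames : Prop := ∀ (rows : List (List (String × Int))) (preferred_fields : Option (List String)), Dom_resolve_report_fieldnames rows preferred_fields → Spec_resolve_report_fieldnames rows preferred_fields (resolve_report_fieldnames rows preferred_fields)

-- ===== LEMMAS AND PROOFS =====

-- A's nested per-row loop is the same dedup-append fold over the flattened key stream.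
lemma pvFoldA_flat (rows : List (List (String × Int))) (init : List String) :
    rows.foldl (fun keys row =>
      (row.map Prod.fst).foldl (fun keys key =>
        if keys.contains key then keys else keys ++ [key]) keys) init
    = (rows.flatMap (fun row => row.map Prod.fst)).foldl (fun keys key =>
        if keys.contains key then keys else keys ++ [key]) init := by
  induction rows generalizing init with
  | nil => rfl
  | cons r rs ih =>
    rw [List.flatMap_cons, List.foldl_cons, List.foldl_append]
    exact ih _

-- A's accumulator: no duplicates, same members as the key stream, and ordered by first occurrence.
lemma pvKeysA_props (flat : List String) :
    (flat.foldl (fun a k => if a.contains k then a else a ++ [k]) []).Nodup ∧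
    (∀ x, x ∈ flat.foldl (fun a k => if a.contains k then a else a ++ [k]) [] ↔ x ∈ flat) ∧
    (flat.foldl (fun a k => if a.contains k then a else a ++ [k]) []).Pairwise
      (fun a b => flat.idxOf a < flat.idxOf b) := by
  induction flat using List.reverseRecOn with
  | nil => simp
  | append_singleton l k ih =>
    obtain ⟨hnd, hmem, hpw⟩ := ih
    rw [List.foldl_append]
    simp only [List.foldl_cons, List.foldl_nil]
    by_cases hk : k ∈ l.foldl (fun a k => if a.contains k then a else a ++ [k]) []
    · rw [if_pos (by simpa using hk)]
      have hkl : k ∈ l := (hmem k).1 hk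
      refine ⟨hnd, ?_, ?_⟩
      · intro x
        rw [hmem x]
        simp only [List.mem_append, List.mem_singleton]
        constructor
        · tauto
        · rintro (h | rfl)
          · exact h
          · exact hkl
      · refine hpw.imp_of_mem ?_
        intro a b ha hb h
        rw [List.idxOf_append_of_mem ((hmem _).1 ha), List.idxOf_append_of_mem ((hmem _).1 hb)]
        exact h
    · rw [if_neg (by simpa using hk)]
      have hkl : k ∉ l := fun h => hk ((hmem k).2 h)
      refine ⟨?_, ?_, ?_⟩
      · rw [List.nodup_append]
        refine ⟨hnd, List.nodup_singleton _, ?_⟩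
        intro a ha b hbm
        have hbk := List.mem_singleton.mp hbm
        subst hbk
        intro heq
        exact hk (heq ▸ ha)
      · intro x
        rw [List.mem_append, List.mem_append, hmem x]
      · rw [List.pairwise_append]
        refine ⟨?_, by simp, ?_⟩
        · refine hpw.imp_of_mem ?_
          intro a b ha hb h
          rw [List.idxOf_append_of_mem ((hmem _).1 ha), List.idxOf_append_of_mem ((hmem _).1 hb)]
          exact h
        · intro a ha b hb
          simp only [List.mem_singleton] at hb
          subst hb
          rw [List.idxOf_append_of_mem ((hmem _).1 ha), List.idxOf_append_of_notMem hkl]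
          have := List.idxOf_lt_length_of_mem ((hmem _).1 ha)
          simp only [List.idxOf_cons_self]
          omega

-- B's dict lookup: the reverse overwrite pass stores each key's first-occurrence index.
lemma pvFirst_get? (flat : List String) (s : Int) (k : String) :
    (((PySem.List.enumerate flat s).reverse).foldl
      (fun (d : PySem.Dict String Int) p => d.insert p.2 p.1) PySem.Dict.empty).get? k
    = (PySem.List.index? flat k).map (fun i : Nat => s + (i : Int)) := by
  induction flat generalizing s with
  | nil => simp [PySem.List.enumerate_nil, PySem.List.index?_eq_idxOf?]
  | cons x xs ih =>
    rw [PySem.List.enumerate_cons, List.reverse_cons, List.foldl_append]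
    simp only [List.foldl_cons, List.foldl_nil]
    by_cases hxk : k = x
    · subst hxk
      rw [PySem.Dict.get?_insert_self, PySem.List.index?_cons_self]
      simp
    · rw [PySem.Dict.get?_insert_of_ne _ _ hxk, ih,
        PySem.List.index?_cons_of_ne xs (fun h => hxk h.symm)]
      cases hI : PySem.List.index? xs k with
      | none => simp
      | some i =>
        simp only [Option.map_some]
        congr 1
        push_cast
        ring

-- index? agrees with idxOf on members.
lemma pvIndex?_mem (flat : List String) (k : String) (h : k ∈ flat) :
    PySem.List.index? flat k = some (flat.idxOf k) := by
  induction flat with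
  | nil => simp at h
  | cons x xs ih =>
    rcases eq_or_ne x k with rfl | hx
    · rw [PySem.List.index?_cons_self]
      simp
    · have hmem : k ∈ xs := by
        rcases List.mem_cons.1 h with rfl | h'
        · exact absurd rfl hx
        · exact h'
      rw [PySem.List.index?_cons_of_ne xs hx, ih hmem]
      simp [hx]

-- B's sort key on a key of the stream is its first-occurrence index.
lemma pvKeyfun (flat : List String) (k : String) (h : k ∈ flat) :
    PySem.Dict.getD (((PySem.List.enumerate flat).reverse).foldl
      (fun (d : PySem.Dict String Int) p => d.insert p.2 p.1) PySem.Dict.empty) k 0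
    = (flat.idxOf k : Int) := by
  rw [PySem.Dict.getD_eq_get?_getD, pvFirst_get? flat 0 k, pvIndex?_mem flat k h]
  simp

-- The keys of B's dict are exactly the distinct keys of the stream, without duplicates.
lemma pvFirst_keys (flat : List String) :
    (∀ x, x ∈ (((PySem.List.enumerate flat).reverse).foldl
      (fun (d : PySem.Dict String Int) p => d.insert p.2 p.1) PySem.Dict.empty).keys ↔ x ∈ flat) ∧
    (((PySem.List.enumerate flat).reverse).foldl
      (fun (d : PySem.Dict String Int) p => d.insert p.2 p.1) PySem.Dict.empty).keys.Nodup := by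
  constructor
  · intro x
    rw [PySem.Dict.keys_foldl_insert_key]
    have h1 : List.map (fun (p : Int × String) => p.2) ((PySem.List.enumerate flat).reverse)
        = flat.reverse := by
      rw [List.map_reverse, PySem.List.map_snd_enumerate]
    rw [h1, PySem.Dict.keys_empty,
      show PySem.Set.update ([] : PySem.Set String) flat.reverse
        = PySem.Set.ofList flat.reverse from rfl,
      PySem.Set.mem_ofList, List.mem_reverse]
  · exact PySem.Dict.nodup_keys_foldl_insert_key _ _ _ _ PySem.Dict.nodup_keys_empty

-- The two membership tests agree.
lemma pvBanned (preferred : List String) (k : String) :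
    PySem.Set.contains (PySem.Set.ofList preferred) k = preferred.contains k := by
  simp [PySem.Set.contains, PySem.Set.mem_ofList]

-- ===== VERDICT (by name: the statement is the Claim_ definition above) =====
theorem resolve_report_fieldnames_spec : Claim_equal_resolve_report_fieldnames := by
  intro rows preferred_fields _
  unfold Spec_resolve_report_fieldnames
  simp only [resolve_report_fieldnames, resolve_report_fieldnames_alt]
  rw [pvFoldA_flat]
  obtain ⟨hnd, hmem, hpw⟩ := pvKeysA_props (rows.flatMap (fun row => row.map Prod.fst))
  obtain ⟨hkmem, hknd⟩ := pvFirst_keys (rows.flatMap (fun row => row.map Prod.fst))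
  congr 1
  refine (PySem.List.sorted_eq_of_perm_of_pairwise_lt _ _ _ ?_ ?_).symm
  · refine (List.perm_ext_iff_of_nodup (hnd.filter _) (hknd.filter _)).mpr ?_
    intro a
    simp only [List.mem_filter, hmem a, hkmem a, pvBanned]
  · refine ((hpw.filter _).imp_of_mem ?_)
    intro a b ha hb h
    have haf := (hmem a).1 (List.mem_of_mem_filter ha)
    have hbf := (hmem b).1 (List.mem_of_mem_filter hb)
    rw [pvKeyfun _ a haf, pvKeyfun _ b hbf]
    exact_mod_cast h
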